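-- pv_equiv track=rewrite | github.com/mils8545/aoc2019py-team | 04/main.py | part1Validate
-- ===== SOURCE A (Python) =====
-- def part1Validate(num):
--     numString = str(num)
--     ascending = True
--     for i in range(len(numString)-1):
--         if numString[i] > numString[i+1]:
--             ascending = False
--
--     adjacent = False
--     for i in range(len(numString)-1):
--         if numString[i] == numString[i+1]:
--             adjacent = True
--
--     return ascending and adjacent
-- ===== SOURCE B (Python) =====
-- def part1Validate(num):
--     s = str(num)
--     return sorted(s) == list(s) and any(a == b for a, b in zip(s, s[1:]))
-- ===== Notes on version B (the rewrite author's own statement) =====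
-- stated objective: idiomatic
-- what changed: Replaces A's two index loops that overwrite boolean flags with a sort-and-compare monotonicity test (sorted(s) == list(s)) and a single any() over zip(s, s[1:]) adjacent pairs.
import Mathlib
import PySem

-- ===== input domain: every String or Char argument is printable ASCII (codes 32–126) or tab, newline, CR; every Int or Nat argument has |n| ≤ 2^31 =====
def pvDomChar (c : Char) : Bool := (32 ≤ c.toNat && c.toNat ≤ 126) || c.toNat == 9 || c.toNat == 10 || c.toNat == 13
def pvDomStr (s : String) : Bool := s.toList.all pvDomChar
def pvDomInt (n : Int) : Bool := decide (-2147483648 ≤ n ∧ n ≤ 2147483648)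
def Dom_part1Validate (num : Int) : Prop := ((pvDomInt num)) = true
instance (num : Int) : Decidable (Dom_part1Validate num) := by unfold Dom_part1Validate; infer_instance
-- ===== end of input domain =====

-- B replaces A's two flag-setting index loops by a sort-and-compare monotonicity test
-- plus an any-over-adjacent-pairs scan (objective: idiomatic; same behaviour, no speed claim).

-- ===== PORT A =====
-- A's two for-loops over range(len(s)-1) become foldls over pyRange; s[i] is
-- PySem.List.pyGet? (always in range here, so .getD default is exact).
def part1Validate (num : Int) : Bool :=
  let numString := PySem.Int.toChars num
  let ascending := (PySem.List.pyRange 0 ((numString.length : Int) - 1) 1).foldl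
    (fun asc i =>
      if (PySem.List.pyGet? numString i).getD default >
         (PySem.List.pyGet? numString (i + 1)).getD default then false else asc) true
  let adjacent := (PySem.List.pyRange 0 ((numString.length : Int) - 1) 1).foldl
    (fun adj i =>
      if (PySem.List.pyGet? numString i).getD default ==
         (PySem.List.pyGet? numString (i + 1)).getD default then true else adj) false
  ascending && adjacent

-- ===== PORT B =====
-- sorted(s) == list(s)  and  any(a == b for a, b in zip(s, s[1:]))  (s[1:] of a list = tail)
def part1Validate_alt (num : Int) : Bool :=
  let s := PySem.Int.toChars num
  (PySem.List.sorted s (fun c => c) false == s) && (s.zip s.tail).any (fun p => p.1 == p.2)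

-- ===== PRECONDITION & SPEC =====
def Spec_part1Validate (num : Int) (out : Bool) : Prop := out = part1Validate_alt num
instance (num : Int) (out : Bool) : Decidable (Spec_part1Validate num out) := by unfold Spec_part1Validate; infer_instance

-- ===== CLAIM (what is proved, stated in full; the proofs are below) =====
def Claim_equal_part1Validate : Prop := ∀ (num : Int), Dom_part1Validate num → Spec_part1Validate num (part1Validate num)

-- ===== LEMMAS AND PROOFS =====

-- A's false-setting flag loop is an 'all'.
theorem foldl_flag_all (l : List Int) (p : Int → Prop) [DecidablePred p] (b : Bool) :
    l.foldl (fun asc i => if p i then false else asc) b = (b && l.all (fun i => !decide (p i))) := by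
  induction l generalizing b with
  | nil => simp
  | cons a t ih =>
    simp only [List.foldl_cons, List.all_cons, ih]
    by_cases h : p a <;> simp [h]

-- A's true-setting flag loop is an 'any'.
theorem foldl_flag_any (l : List Int) (p : Int → Prop) [DecidablePred p] (b : Bool) :
    l.foldl (fun adj i => if p i then true else adj) b = (b || l.any (fun i => decide (p i))) := by
  induction l generalizing b with
  | nil => simp
  | cons a t ih =>
    simp only [List.foldl_cons, List.any_cons, ih]
    by_cases h : p a <;> simp [h]

theorem zip_tail_eq (cs : List Char) :
    cs.zip cs.tail =
      (List.range (cs.length - 1)).map (fun i => (cs.getD i default, cs.getD (i + 1) default)) := by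
  apply List.ext_getElem
  · simp [List.length_zip, List.length_tail]
  · intro i h1 h2
    have hlen : i < cs.length - 1 := by simpa using h2
    simp [List.getElem_zip, List.getElem_tail, List.getD_eq_getElem?_getD,
      List.getElem?_eq_getElem (by omega : i < cs.length),
      List.getElem?_eq_getElem (by omega : i + 1 < cs.length)]

theorem chain_le_iff (cs : List Char) :
    List.IsChain (· ≤ ·) cs ↔ ∀ i < cs.length - 1, cs.getD i default ≤ cs.getD (i + 1) default := by
  rw [List.isChain_iff_getElem]
  constructor
  · intro h i hi
    have := h i (by omega)
    simpa [List.getD_eq_getElem?_getD, List.getElem?_eq_getElem (by omega : i < cs.length),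
      List.getElem?_eq_getElem (by omega : i + 1 < cs.length)] using this
  · intro h i hi
    have := h i (by omega)
    simpa [List.getD_eq_getElem?_getD, List.getElem?_eq_getElem (by omega : i < cs.length),
      List.getElem?_eq_getElem (by omega : i + 1 < cs.length)] using this

theorem sorted_eq_self_iff (cs : List Char) :
    (PySem.List.sorted cs (fun c => c) false = cs) ↔ List.IsChain (· ≤ ·) cs := by
  rw [List.isChain_iff_pairwise]
  constructor
  · intro h
    have hp := PySem.List.sorted_pairwise cs (fun c => c)
    rwa [h] at hp
  · intro h
    exact PySem.List.sorted_eq_self_of_pairwise cs (fun c => c) h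

-- A's ascending flag over range(len-1) is B's sorted(s) == list(s).
theorem asc_eq (cs : List Char) :
    (PySem.List.pyRange 0 ((cs.length : Int) - 1) 1).all
      (fun i => !decide ((PySem.List.pyGet? cs i).getD default >
                         (PySem.List.pyGet? cs (i + 1)).getD default))
    = (PySem.List.sorted cs (fun c => c) false == cs) := by
  rw [Bool.eq_iff_iff, List.all_eq_true, beq_iff_eq, sorted_eq_self_iff, chain_le_iff]
  constructor
  · intro h i hi
    have hmem : (i : Int) ∈ PySem.List.pyRange 0 ((cs.length : Int) - 1) 1 := by
      rw [PySem.List.mem_pyRange_one]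
      omega
    have := h _ hmem
    have hcast : (i : Int) + 1 = ((i + 1 : Nat) : Int) := by push_cast; ring
    rw [hcast, PySem.List.pyGet?_natCast, PySem.List.pyGet?_natCast] at this
    simp only [List.getD_eq_getElem?_getD, Bool.not_eq_eq_eq_not, Bool.not_true,
      decide_eq_false_iff_not, not_lt] at this ⊢
    exact this
  · intro h i hmem
    rw [PySem.List.mem_pyRange_one] at hmem
    obtain ⟨h0, hlt⟩ := hmem
    have hi : i.toNat < cs.length - 1 := by omega
    have := h i.toNat hi
    have hc1 : i = ((i.toNat : Nat) : Int) := by omega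
    rw [hc1]
    have hcast : ((i.toNat : Nat) : Int) + 1 = ((i.toNat + 1 : Nat) : Int) := by push_cast; ring
    rw [hcast, PySem.List.pyGet?_natCast, PySem.List.pyGet?_natCast]
    simp only [List.getD_eq_getElem?_getD] at this
    simp only [Bool.not_eq_eq_eq_not, Bool.not_true, decide_eq_false_iff_not, not_lt]
    exact this

-- A's adjacent flag over range(len-1) is B's any over zip(s, s[1:]).
theorem adj_eq (cs : List Char) :
    (PySem.List.pyRange 0 ((cs.length : Int) - 1) 1).any
      (fun i => decide (((PySem.List.pyGet? cs i).getD default ==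
                         (PySem.List.pyGet? cs (i + 1)).getD default) = true))
    = (cs.zip cs.tail).any (fun p => p.1 == p.2) := by
  rw [zip_tail_eq, List.any_map, Bool.eq_iff_iff, List.any_eq_true, List.any_eq_true]
  constructor
  · intro ⟨i, hmem, hp⟩
    rw [PySem.List.mem_pyRange_one] at hmem
    refine ⟨i.toNat, List.mem_range.mpr (by omega), ?_⟩
    have hc1 : i = ((i.toNat : Nat) : Int) := by omega
    rw [hc1] at hp
    have hcast : ((i.toNat : Nat) : Int) + 1 = ((i.toNat + 1 : Nat) : Int) := by push_cast; ring
    rw [hcast, PySem.List.pyGet?_natCast, PySem.List.pyGet?_natCast] at hp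
    simpa [List.getD_eq_getElem?_getD] using hp
  · intro ⟨i, hmem, hp⟩
    rw [List.mem_range] at hmem
    refine ⟨(i : Int), by rw [PySem.List.mem_pyRange_one]; omega, ?_⟩
    have hcast : (i : Int) + 1 = ((i + 1 : Nat) : Int) := by push_cast; ring
    rw [hcast, PySem.List.pyGet?_natCast, PySem.List.pyGet?_natCast]
    simpa [List.getD_eq_getElem?_getD] using hp

-- ===== VERDICT (by name: the statement is the Claim_ definition above) =====
theorem part1Validate_spec : Claim_equal_part1Validate := by
  intro num _
  unfold Spec_part1Validate
  simp only [part1Validate, part1Validate_alt]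
  rw [foldl_flag_all, foldl_flag_any, Bool.true_and, Bool.false_or, asc_eq, adj_eq]
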